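-- pv_equiv track=rewrite | github.com/CYB3R-BO1/SPIDER | agents/cgen_agent.py | _natural_loop
-- ===== SOURCE A (Python) =====
-- from typing import Dict, List, Optional, Set, Tuple
--
-- def _natural_loop(
--     src: int, header: int, preds: Dict[int, Set[int]]
-- ) -> Set[int]:
--     loop_nodes = {header, src}
--     stack = [src]
--     while stack:
--         node = stack.pop()
--         for p in preds.get(node, set()):
--             if p not in loop_nodes:
--                 loop_nodes.add(p)
--                 if p != header:
--                     stack.append(p)
--     return loop_nodes
-- ===== SOURCE B (Python) =====
-- from typing import Dict, List, Optional, Set, Tuple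
--
-- def _natural_loop(
--     src: int, header: int, preds: Dict[int, Set[int]]
-- ) -> Set[int]:
--     # Fixpoint saturation (chaotic iteration): no worklist at all.  Repeatedly
--     # sweep the whole predecessor map, expanding every already-collected node
--     # (the header is a boundary: only expanded when it is src itself), until a
--     # full sweep adds nothing.  The result is the least such closed superset of
--     # {header, src}, which is exactly the set the worklist traversal computes.
--     loop_nodes = {header, src}
--     changed = True
--     while changed:
--         changed = False
--         for n in preds:
--             if n in loop_nodes and (n == src or n != header):
--                 for p in preds[n]:
--                     if p not in loop_nodes:
--                         loop_nodes.add(p)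
--                         changed = True
--     return loop_nodes
-- ===== Notes on version B (the rewrite author's own statement) =====
-- stated objective: alternative
-- what changed: Replaces the worklist (stack) traversal by a worklist-free fixpoint saturation: repeated full sweeps over the predecessor map that expand every collected node (header only when it is src) until a sweep adds nothing; the least closed superset of {header, src} is the same set.
import Mathlib
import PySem

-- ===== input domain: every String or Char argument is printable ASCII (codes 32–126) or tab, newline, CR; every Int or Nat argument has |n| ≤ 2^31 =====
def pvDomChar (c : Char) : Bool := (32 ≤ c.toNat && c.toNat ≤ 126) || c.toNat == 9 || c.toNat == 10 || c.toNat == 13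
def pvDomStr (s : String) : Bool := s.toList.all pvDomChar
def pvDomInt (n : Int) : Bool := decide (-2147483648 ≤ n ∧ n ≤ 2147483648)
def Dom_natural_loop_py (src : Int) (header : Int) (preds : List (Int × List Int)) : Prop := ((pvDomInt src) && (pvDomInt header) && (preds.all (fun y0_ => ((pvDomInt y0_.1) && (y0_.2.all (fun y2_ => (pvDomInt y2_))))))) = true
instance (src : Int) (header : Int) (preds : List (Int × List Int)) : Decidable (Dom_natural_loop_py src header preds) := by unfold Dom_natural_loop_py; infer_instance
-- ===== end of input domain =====

-- B replaces A's stack worklist by a worklist-free fixpoint saturation: repeated full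
-- sweeps over the predecessor map, expanding every collected node (the header only when
-- it is src), until a sweep adds nothing (objective: alternative; A is O(V+E), B O(V*E)).
-- The Python function returns a SET of ints; Python's set iteration order is not modelled,
-- and the resulting set is order-independent, so both ports return the set as its canonical
-- sorted list of distinct elements.

-- ===== PORT A =====
-- the stack is held top-first (push = cons, pop = head); iteration of one popped node's
-- predecessor set, in the order of the modelled list:
def pvA_inner (header : Int) (st : List Int × List Int) (ps : List Int) : List Int × List Int :=
  ps.foldl (fun st p =>
    if PySem.Set.contains st.1 p then st
    else (PySem.Set.add st.1 p, if p == header then st.2 else p :: st.2)) st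

-- 'while stack:' with a fuel bound (1 + total size of all predecessor lists, enough since
-- every push is a node newly added to loop_nodes); runs until the stack is empty:
def pvA_loop (preds : List (Int × List Int)) (header : Int) : Nat → List Int → List Int → List Int
  | 0, nodes, _ => nodes
  | _ + 1, nodes, [] => nodes
  | fuel + 1, nodes, node :: stk =>
      let st := pvA_inner header (nodes, stk) (PySem.Dict.getD (PySem.Dict.mk preds) node [])
      pvA_loop preds header fuel st.1 st.2

def natural_loop_py (src : Int) (header : Int) (preds : List (Int × List Int)) : List Int :=
  let loop_nodes : PySem.Set Int := PySem.Set.add (PySem.Set.add PySem.Set.empty header) src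
  PySem.List.sorted
    (pvA_loop preds header (preds.foldl (fun a kv => a + kv.2.length) 0 + 1) loop_nodes [src])
    (fun x => x) false

-- ===== PORT B =====
-- 'for p in preds[n]: if p not in loop_nodes: add p; changed = True' for one swept node n;
-- the Bool of the state is the 'changed' flag:
def pvB_inner (st : List Int × Bool) (ps : List Int) : List Int × Bool :=
  ps.foldl (fun st p =>
    if PySem.Set.contains st.1 p then st else (PySem.Set.add st.1 p, true)) st

-- one full sweep 'for n in preds: …' over the key list of the map, from changed = false:
def pvB_pass (src header : Int) (d : PySem.Dict Int (List Int)) (ks : List Int)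
    (st : List Int × Bool) : List Int × Bool :=
  ks.foldl (fun st n =>
    if PySem.Set.contains st.1 n && (n == src || !(n == header)) then
      pvB_inner st (PySem.Dict.getD d n [])
    else st) st

-- 'while changed:' with a fuel bound (1 + total size of all predecessor lists, enough since
-- every sweep that reports a change has added at least one new node):
def pvB_loop (src header : Int) (d : PySem.Dict Int (List Int)) (ks : List Int) : Nat → List Int → List Int
  | 0, nodes => nodes
  | fuel + 1, nodes =>
      let st := pvB_pass src header d ks (nodes, false)
      if st.2 then pvB_loop src header d ks fuel st.1 else st.1

def natural_loop_py_alt (src : Int) (header : Int) (preds : List (Int × List Int)) : List Int :=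
  let d := PySem.Dict.mk preds
  let loop_nodes : PySem.Set Int := PySem.Set.add (PySem.Set.add PySem.Set.empty header) src
  PySem.List.sorted
    (pvB_loop src header d d.keys (preds.foldl (fun a kv => a + kv.2.length) 0 + 1) loop_nodes)
    (fun x => x) false

-- ===== PRECONDITION & SPEC =====
def Spec_natural_loop_py (src : Int) (header : Int) (preds : List (Int × List Int)) (out : List Int) : Prop := out = natural_loop_py_alt src header preds
instance (src : Int) (header : Int) (preds : List (Int × List Int)) (out : List Int) : Decidable (Spec_natural_loop_py src header preds out) := by unfold Spec_natural_loop_py; infer_instance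

-- ===== CLAIM (what is proved, stated in full; the proofs are below) =====
def Claim_equal_natural_loop_py : Prop := ∀ (src : Int) (header : Int) (preds : List (Int × List Int)), Dom_natural_loop_py src header preds → Spec_natural_loop_py src header preds (natural_loop_py src header preds)

-- ===== LEMMAS AND PROOFS =====

-- a set S is closed under the traversal step: every member other than a non-src header
-- has all its predecessors in S
def pvClosed (src header : Int) (preds : List (Int × List Int)) (S : List Int) : Prop :=
  ∀ n ∈ S, (n = src ∨ n ≠ header) → ∀ p ∈ PySem.Dict.getD (PySem.Dict.mk preds) n [], p ∈ S

-- all ints occurring in predecessor lists (with multiplicity); the fuel pool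
def pvCands (preds : List (Int × List Int)) : List Int := preds.flatMap (fun kv => kv.2)

-- number of candidates not yet in nodes (termination measure component)
def pvMiss (preds : List (Int × List Int)) (nodes : List Int) : Nat :=
  ((pvCands preds).toFinset \ nodes.toFinset).card

lemma pv_getD_sub {preds : List (Int × List Int)} {n p : Int}
    (h : p ∈ PySem.Dict.getD (PySem.Dict.mk preds) n []) : p ∈ pvCands preds := by
  unfold PySem.Dict.getD PySem.Dict.get? at h
  cases hf : List.find? (fun q => q.1 == n) (PySem.Dict.mk preds).items with
  | none => rw [hf] at h; simp at h
  | some kv =>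
      rw [hf] at h
      simp only [Option.map_some, Option.getD_some] at h
      have hkv : kv ∈ preds := List.mem_of_find?_eq_some hf
      exact List.mem_flatMap.mpr ⟨kv, hkv, h⟩

-- a nonempty lookup means the looked-up key occurs in the key list
lemma pv_getD_key_mem {preds : List (Int × List Int)} {n p : Int}
    (h : p ∈ PySem.Dict.getD (PySem.Dict.mk preds) n []) : n ∈ (PySem.Dict.mk preds).keys := by
  unfold PySem.Dict.getD PySem.Dict.get? at h
  cases hf : List.find? (fun q => q.1 == n) (PySem.Dict.mk preds).items with
  | none => rw [hf] at h; simp at h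
  | some kv =>
      have hkv : kv ∈ (PySem.Dict.mk preds).items := List.mem_of_find?_eq_some hf
      have hb := List.find?_some hf
      have : kv.1 = n := by simpa using hb
      subst this
      exact List.mem_map.mpr ⟨kv, hkv, rfl⟩

lemma pv_fuel_eq (preds : List (Int × List Int)) :
    preds.foldl (fun a kv => a + kv.2.length) 0 = (pvCands preds).length := by
  rw [PySem.List.foldl_add_nat]
  simp [pvCands, List.length_flatMap]

lemma pv_miss_le (preds : List (Int × List Int)) (nodes : List Int) :
    pvMiss preds nodes ≤ (pvCands preds).length := by
  calc pvMiss preds nodes ≤ (pvCands preds).toFinset.card := Finset.card_le_card (Finset.sdiff_subset)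
    _ ≤ (pvCands preds).length := List.toFinset_card_le _

lemma pv_miss_drop {preds : List (Int × List Int)} {nodes d : List Int}
    (hnd : d.Nodup) (hd : ∀ x ∈ d, x ∈ pvCands preds ∧ x ∉ nodes) :
    pvMiss preds (nodes ++ d) + d.length ≤ pvMiss preds nodes := by
  have hsub : d.toFinset ⊆ (pvCands preds).toFinset \ nodes.toFinset := by
    intro x hx
    rw [List.mem_toFinset] at hx
    rcases hd x hx with ⟨h1, h2⟩
    simp [Finset.mem_sdiff, List.mem_toFinset, h1, h2]
  have hset : (pvCands preds).toFinset \ (nodes ++ d).toFinset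
      = ((pvCands preds).toFinset \ nodes.toFinset) \ d.toFinset := by
    ext x; simp [Finset.mem_sdiff, List.mem_toFinset]; tauto
  have hcard : d.toFinset.card = d.length := List.toFinset_card_of_nodup hnd
  unfold pvMiss
  rw [hset, Finset.card_sdiff_of_subset hsub, hcard]
  have := Finset.card_le_card hsub
  omega

lemma pvA_inner_spec (header : Int) (ps : List Int) :
    ∀ nodes stack : List Int, ∃ d : List Int,
      (pvA_inner header (nodes, stack) ps).1 = nodes ++ d ∧
      d.Nodup ∧
      (∀ x ∈ d, x ∈ ps ∧ x ∉ nodes) ∧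
      (∀ p ∈ ps, p ∈ nodes ++ d) ∧
      (pvA_inner header (nodes, stack) ps).2.length ≤ stack.length + d.length ∧
      (∀ x, x ∈ (pvA_inner header (nodes, stack) ps).2 ↔ x ∈ stack ∨ (x ∈ d ∧ x ≠ header)) := by
  induction ps with
  | nil =>
      intro nodes stack
      exact ⟨[], by simp [pvA_inner], List.nodup_nil, by simp, by simp,
        by simp [pvA_inner], by simp [pvA_inner]⟩
  | cons p ps ih =>
      intro nodes stack
      by_cases hp : p ∈ nodes
      · have hstep : pvA_inner header (nodes, stack) (p :: ps) = pvA_inner header (nodes, stack) ps := by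
          simp [pvA_inner, List.foldl_cons, hp]
        obtain ⟨d, h1, h2, h3, h4, h5, h6⟩ := ih nodes stack
        refine ⟨d, by rw [hstep]; exact h1, h2, ?_, ?_, by rw [hstep]; exact h5, by rw [hstep]; exact h6⟩
        · exact fun x hx => ⟨List.mem_cons_of_mem _ (h3 x hx).1, (h3 x hx).2⟩
        · intro q hq
          rcases List.mem_cons.1 hq with rfl | hq
          · exact List.mem_append_left _ hp
          · exact h4 q hq
      · by_cases hph : p = header
        · have hstep : pvA_inner header (nodes, stack) (p :: ps)
              = pvA_inner header (nodes ++ [p], stack) ps := by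
            subst hph; simp [pvA_inner, List.foldl_cons, hp]
          obtain ⟨d, h1, h2, h3, h4, h5, h6⟩ := ih (nodes ++ [p]) stack
          refine ⟨p :: d, ?_, ?_, ?_, ?_, ?_, ?_⟩
          · rw [hstep, h1]; simp
          · exact List.nodup_cons.mpr ⟨fun hpd => (h3 p hpd).2 (by simp), h2⟩
          · intro x hx
            rcases List.mem_cons.1 hx with rfl | hx
            · exact ⟨List.mem_cons_self, hp⟩
            · refine ⟨List.mem_cons_of_mem _ (h3 x hx).1, ?_⟩
              have := (h3 x hx).2; simp at this; tauto
          · intro q hq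
            rcases List.mem_cons.1 hq with rfl | hq
            · simp
            · have := h4 q hq; simp at this ⊢; tauto
          · rw [hstep]
            calc (pvA_inner header (nodes ++ [p], stack) ps).2.length
                ≤ stack.length + d.length := h5
              _ ≤ stack.length + (p :: d).length := by simp
          · intro x
            rw [hstep, h6 x]
            subst hph
            constructor
            · rintro (hx | ⟨hx, hne⟩)
              · exact Or.inl hx
              · exact Or.inr ⟨List.mem_cons_of_mem _ hx, hne⟩
            · rintro (hx | ⟨hx, hne⟩)
              · exact Or.inl hx
              · rcases List.mem_cons.1 hx with rfl | hx
                · exact absurd rfl hne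
                · exact Or.inr ⟨hx, hne⟩
        · have hstep : pvA_inner header (nodes, stack) (p :: ps)
              = pvA_inner header (nodes ++ [p], p :: stack) ps := by
            simp [pvA_inner, List.foldl_cons, hp, hph]
          obtain ⟨d, h1, h2, h3, h4, h5, h6⟩ := ih (nodes ++ [p]) (p :: stack)
          refine ⟨p :: d, ?_, ?_, ?_, ?_, ?_, ?_⟩
          · rw [hstep, h1]; simp
          · exact List.nodup_cons.mpr ⟨fun hpd => (h3 p hpd).2 (by simp), h2⟩
          · intro x hx
            rcases List.mem_cons.1 hx with rfl | hx
            · exact ⟨List.mem_cons_self, hp⟩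
            · refine ⟨List.mem_cons_of_mem _ (h3 x hx).1, ?_⟩
              have := (h3 x hx).2; simp at this; tauto
          · intro q hq
            rcases List.mem_cons.1 hq with rfl | hq
            · simp
            · have := h4 q hq; simp at this ⊢; tauto
          · rw [hstep]
            have := h5; simp at this ⊢; omega
          · intro x
            rw [hstep, h6 x]
            simp only [List.mem_cons]
            constructor
            · rintro ((rfl | hx) | ⟨hx, hne⟩)
              · exact Or.inr ⟨Or.inl rfl, hph⟩
              · exact Or.inl hx
              · exact Or.inr ⟨Or.inr hx, hne⟩
            · rintro (hx | ⟨(rfl | hx), hne⟩)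
              · exact Or.inl (Or.inr hx)
              · exact Or.inl (Or.inl rfl)
              · exact Or.inr ⟨hx, hne⟩

lemma pvA_loop_sound (preds : List (Int × List Int)) (src header : Int) (T : List Int)
    (hT : pvClosed src header preds T) :
    ∀ (fuel : Nat) (nodes stack : List Int),
      (∀ x ∈ nodes, x ∈ T) → (∀ x ∈ stack, x ∈ T) → (∀ x ∈ stack, x = src ∨ x ≠ header) →
      ∀ y ∈ pvA_loop preds header fuel nodes stack, y ∈ T := by
  intro fuel
  induction fuel with
  | zero => intro nodes stack hn _ _ y hy; simp [pvA_loop] at hy; exact hn y hy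
  | succ fuel ih =>
      intro nodes stack hn hs hexp y hy
      cases stack with
      | nil => simp [pvA_loop] at hy; exact hn y hy
      | cons node stk =>
          rw [show pvA_loop preds header (fuel + 1) nodes (node :: stk)
              = pvA_loop preds header fuel
                  (pvA_inner header (nodes, stk) (PySem.Dict.getD (PySem.Dict.mk preds) node [])).1
                  (pvA_inner header (nodes, stk) (PySem.Dict.getD (PySem.Dict.mk preds) node [])).2
            from rfl] at hy
          obtain ⟨d, h1, h2, h3, h4, h5, h6⟩ :=
            pvA_inner_spec header (PySem.Dict.getD (PySem.Dict.mk preds) node []) nodes stk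
          have hdT : ∀ x ∈ d, x ∈ T := fun x hx =>
            hT node (hs node List.mem_cons_self) (hexp node List.mem_cons_self) x (h3 x hx).1
          refine ih _ _ ?_ ?_ ?_ y hy
          · intro x hx
            rw [h1] at hx
            rcases List.mem_append.1 hx with hx | hx
            · exact hn x hx
            · exact hdT x hx
          · intro x hx
            rcases (h6 x).1 hx with hx | ⟨hx, _⟩
            · exact hs x (List.mem_cons_of_mem _ hx)
            · exact hdT x hx
          · intro x hx
            rcases (h6 x).1 hx with hx | ⟨_, hne⟩
            · exact hexp x (List.mem_cons_of_mem _ hx)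
            · exact Or.inr hne

lemma pvA_loop_complete (preds : List (Int × List Int)) (src header : Int) :
    ∀ (fuel : Nat) (nodes stack : List Int),
      nodes.Nodup → src ∈ nodes → header ∈ nodes →
      (∀ x ∈ stack, x ∈ nodes) →
      (∀ n ∈ nodes, n ∉ stack → (n = src ∨ n ≠ header) →
        ∀ p ∈ PySem.Dict.getD (PySem.Dict.mk preds) n [], p ∈ nodes) →
      stack.length + pvMiss preds nodes ≤ fuel →
      (pvA_loop preds header fuel nodes stack).Nodup ∧
      (∀ x ∈ nodes, x ∈ pvA_loop preds header fuel nodes stack) ∧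
      pvClosed src header preds (pvA_loop preds header fuel nodes stack) := by
  intro fuel
  induction fuel with
  | zero =>
      intro nodes stack hnd hsrc hhd hsub hinv hfuel
      have hstack : stack = [] := by
        have := List.length_eq_zero_iff.mp (by omega : stack.length = 0); exact this
      subst hstack
      exact ⟨by simpa [pvA_loop] using hnd, by simp [pvA_loop],
        by simpa [pvA_loop] using fun n hn => hinv n hn (by simp)⟩
  | succ fuel ih =>
      intro nodes stack hnd hsrc hhd hsub hinv hfuel
      cases stack with
      | nil =>
          exact ⟨by simpa [pvA_loop] using hnd, by simp [pvA_loop],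
            by simpa [pvA_loop] using fun n hn => hinv n hn (by simp)⟩
      | cons node stk =>
          rw [show pvA_loop preds header (fuel + 1) nodes (node :: stk)
              = pvA_loop preds header fuel
                  (pvA_inner header (nodes, stk) (PySem.Dict.getD (PySem.Dict.mk preds) node [])).1
                  (pvA_inner header (nodes, stk) (PySem.Dict.getD (PySem.Dict.mk preds) node [])).2
            from rfl]
          obtain ⟨d, h1, h2, h3, h4, h5, h6⟩ :=
            pvA_inner_spec header (PySem.Dict.getD (PySem.Dict.mk preds) node []) nodes stk
          have hdis : ∀ x ∈ d, x ∉ nodes := fun x hx => (h3 x hx).2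
          have hnd' : (nodes ++ d).Nodup := by
            rw [List.nodup_append]
            refine ⟨hnd, h2, ?_⟩
            intro a ha b hb rfl
            exact hdis a hb ha
          have hdrop := pv_miss_drop h2 (fun x hx =>
            ⟨pv_getD_sub (h3 x hx).1, (h3 x hx).2⟩)
          obtain ⟨ha, hb, hc⟩ := ih (pvA_inner header (nodes, stk) (PySem.Dict.getD (PySem.Dict.mk preds) node [])).1
            (pvA_inner header (nodes, stk) (PySem.Dict.getD (PySem.Dict.mk preds) node [])).2
            (h1 ▸ hnd')
            (h1 ▸ List.mem_append_left _ hsrc)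
            (h1 ▸ List.mem_append_left _ hhd)
            (by
              intro x hx
              rw [h1]
              rcases (h6 x).1 hx with hx | ⟨hx, _⟩
              · exact List.mem_append_left _ (hsub x (List.mem_cons_of_mem _ hx))
              · exact List.mem_append_right _ hx)
            (by
              intro n hn hns hexp p hp
              rw [h1] at hn ⊢
              rcases List.mem_append.1 hn with hn | hn
              · by_cases hnode : n = node
                · subst hnode; exact h4 p hp
                · have hnstk : n ∉ stk := by
                    intro hmem
                    exact hns ((h6 n).2 (Or.inl hmem))
                  have : n ∉ node :: stk := by
                    simp [hnode, hnstk]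
                  exact List.mem_append_left _ (hinv n hn this hexp p hp)
              · exfalso
                by_cases hnh : n = header
                · rcases hexp with rfl | hne
                  · exact (h3 n hn).2 hsrc
                  · exact hne hnh
                · exact hns ((h6 n).2 (Or.inr ⟨hn, hnh⟩)))
            (by
              rw [h1]
              have hlen := h5
              have hmiss := hdrop
              simp only [List.length_cons] at hfuel
              omega)
          refine ⟨ha, ?_, hc⟩
          intro x hx
          exact hb x (h1 ▸ List.mem_append_left _ hx)

-- one swept node: the nodes grow by exactly the missing predecessors, the flag records
-- whether anything was added
lemma pvB_inner_spec (ps : List Int) :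
    ∀ (nodes : List Int) (c : Bool), ∃ d : List Int,
      (pvB_inner (nodes, c) ps).1 = nodes ++ d ∧
      d.Nodup ∧
      (∀ x ∈ d, x ∈ ps ∧ x ∉ nodes) ∧
      (∀ p ∈ ps, p ∈ nodes ++ d) ∧
      (pvB_inner (nodes, c) ps).2 = (c || !d.isEmpty) := by
  induction ps with
  | nil =>
      intro nodes c
      exact ⟨[], by simp [pvB_inner], List.nodup_nil, by simp, by simp, by simp [pvB_inner]⟩
  | cons p ps ih =>
      intro nodes c
      by_cases hp : p ∈ nodes
      · have hstep : pvB_inner (nodes, c) (p :: ps) = pvB_inner (nodes, c) ps := by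
          simp [pvB_inner, List.foldl_cons, hp]
        obtain ⟨d, h1, h2, h3, h4, h5⟩ := ih nodes c
        refine ⟨d, by rw [hstep]; exact h1, h2, ?_, ?_, by rw [hstep]; exact h5⟩
        · exact fun x hx => ⟨List.mem_cons_of_mem _ (h3 x hx).1, (h3 x hx).2⟩
        · intro q hq
          rcases List.mem_cons.1 hq with rfl | hq
          · exact List.mem_append_left _ hp
          · exact h4 q hq
      · have hstep : pvB_inner (nodes, c) (p :: ps) = pvB_inner (nodes ++ [p], true) ps := by
          simp [pvB_inner, List.foldl_cons, hp]
        obtain ⟨d, h1, h2, h3, h4, h5⟩ := ih (nodes ++ [p]) true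
        refine ⟨p :: d, by rw [hstep, h1]; simp, ?_, ?_, ?_, ?_⟩
        · exact List.nodup_cons.mpr ⟨fun hpd => (h3 p hpd).2 (by simp), h2⟩
        · intro x hx
          rcases List.mem_cons.1 hx with rfl | hx
          · exact ⟨List.mem_cons_self, hp⟩
          · refine ⟨List.mem_cons_of_mem _ (h3 x hx).1, ?_⟩
            have := (h3 x hx).2; simp at this; tauto
        · intro q hq
          rcases List.mem_cons.1 hq with rfl | hq
          · simp
          · have := h4 q hq; simp at this ⊢; tauto
        · rw [hstep, h5]; simp

-- one full sweep: nodes grow by distinct missing candidates, the flag records whether the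
-- sweep changed anything, and an unchanged sweep certifies closure at every swept key
lemma pvB_pass_spec (src header : Int) (preds : List (Int × List Int)) (ks : List Int) :
    ∀ (nodes : List Int) (c : Bool), ∃ e : List Int,
      (pvB_pass src header (PySem.Dict.mk preds) ks (nodes, c)).1 = nodes ++ e ∧
      e.Nodup ∧
      (∀ x ∈ e, x ∈ pvCands preds ∧ x ∉ nodes) ∧
      (pvB_pass src header (PySem.Dict.mk preds) ks (nodes, c)).2 = (c || !e.isEmpty) ∧
      (e = [] → ∀ n ∈ ks, n ∈ nodes → (n = src ∨ n ≠ header) →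
        ∀ p ∈ PySem.Dict.getD (PySem.Dict.mk preds) n [], p ∈ nodes) := by
  induction ks with
  | nil =>
      intro nodes c
      exact ⟨[], by simp [pvB_pass], List.nodup_nil, by simp, by simp [pvB_pass], by simp⟩
  | cons n ks ih =>
      intro nodes c
      by_cases hb : (PySem.Set.contains nodes n && (n == src || !(n == header))) = true
      · have hstep : pvB_pass src header (PySem.Dict.mk preds) (n :: ks) (nodes, c)
            = pvB_pass src header (PySem.Dict.mk preds) ks
                (pvB_inner (nodes, c) (PySem.Dict.getD (PySem.Dict.mk preds) n [])) := by
          simp only [pvB_pass, List.foldl_cons]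
          rw [if_pos hb]
        obtain ⟨d₁, g1, g2, g3, g4, g5⟩ :=
          pvB_inner_spec (PySem.Dict.getD (PySem.Dict.mk preds) n []) nodes c
        have hst : pvB_inner (nodes, c) (PySem.Dict.getD (PySem.Dict.mk preds) n [])
            = (nodes ++ d₁, (c || !d₁.isEmpty)) := by
          rw [← g1, ← g5]
        obtain ⟨e₂, k1, k2, k3, k4, k5⟩ := ih (nodes ++ d₁) (c || !d₁.isEmpty)
        refine ⟨d₁ ++ e₂, ?_, ?_, ?_, ?_, ?_⟩
        · rw [hstep, hst, k1, List.append_assoc]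
        · rw [List.nodup_append]
          refine ⟨g2, k2, ?_⟩
          rintro a ha b hb' rfl
          exact (k3 a hb').2 (List.mem_append_right _ ha)
        · intro x hx
          rcases List.mem_append.1 hx with hx | hx
          · exact ⟨pv_getD_sub (g3 x hx).1, (g3 x hx).2⟩
          · exact ⟨(k3 x hx).1, fun hmem => (k3 x hx).2 (List.mem_append_left _ hmem)⟩
        · rw [hstep, hst, k4]
          cases c <;> cases d₁ <;> cases e₂ <;> simp
        · intro he m hm hmn hmexp p hp
          rcases List.append_eq_nil_iff.mp he with ⟨hd1, he2⟩
          subst hd1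
          rcases List.mem_cons.1 hm with rfl | hm
          · have := g4 p hp; simpa using this
          · have := k5 he2 m hm (by simpa using hmn) hmexp p hp
            simpa using this
      · have hstep : pvB_pass src header (PySem.Dict.mk preds) (n :: ks) (nodes, c)
            = pvB_pass src header (PySem.Dict.mk preds) ks (nodes, c) := by
          simp only [pvB_pass, List.foldl_cons]
          rw [if_neg hb]
        obtain ⟨e, h1, h2, h3, h4, h5⟩ := ih nodes c
        refine ⟨e, by rw [hstep]; exact h1, h2, h3, by rw [hstep]; exact h4, ?_⟩
        · intro he m hm hmn hmexp p hp
          rcases List.mem_cons.1 hm with rfl | hm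
          · exfalso
            apply hb
            have hc : PySem.Set.contains nodes m = true := (PySem.Set.contains_iff _ _).mpr hmn
            have he' : (m == src || !(m == header)) = true := by
              rcases hmexp with rfl | hne
              · simp
              · simp [hne]
            simp only [hc, he', Bool.and_self]
          · exact h5 he m hm hmn hmexp p hp

lemma pvB_pass_sound (src header : Int) (preds : List (Int × List Int)) (T : List Int)
    (hT : pvClosed src header preds T) (ks : List Int) :
    ∀ (nodes : List Int) (c : Bool), (∀ x ∈ nodes, x ∈ T) →
      ∀ x ∈ (pvB_pass src header (PySem.Dict.mk preds) ks (nodes, c)).1, x ∈ T := by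
  induction ks with
  | nil =>
      intro nodes c hn x hx
      simp only [pvB_pass, List.foldl_nil] at hx
      exact hn x hx
  | cons n ks ih =>
      intro nodes c hn x hx
      by_cases hb : (PySem.Set.contains nodes n && (n == src || !(n == header))) = true
      · have hstep : pvB_pass src header (PySem.Dict.mk preds) (n :: ks) (nodes, c)
            = pvB_pass src header (PySem.Dict.mk preds) ks
                (pvB_inner (nodes, c) (PySem.Dict.getD (PySem.Dict.mk preds) n [])) := by
          simp only [pvB_pass, List.foldl_cons]
          rw [if_pos hb]
        have hmem : n ∈ nodes := by
          have := (Bool.and_elim_left hb)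
          exact (PySem.Set.contains_iff _ _).mp this
        have hexp : n = src ∨ n ≠ header := by
          have := (Bool.and_elim_right hb)
          rcases Bool.or_eq_true_iff.mp this with h | h
          · exact Or.inl (by simpa using h)
          · exact Or.inr (by simpa using h)
        have hps : ∀ p ∈ PySem.Dict.getD (PySem.Dict.mk preds) n [], p ∈ T :=
          hT n (hn n hmem) hexp
        obtain ⟨d₁, g1, g2, g3, g4, g5⟩ :=
          pvB_inner_spec (PySem.Dict.getD (PySem.Dict.mk preds) n []) nodes c
        have hst : pvB_inner (nodes, c) (PySem.Dict.getD (PySem.Dict.mk preds) n [])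
            = (nodes ++ d₁, (c || !d₁.isEmpty)) := by
          rw [← g1, ← g5]
        rw [hstep, hst] at hx
        refine ih (nodes ++ d₁) _ ?_ x hx
        intro y hy
        rcases List.mem_append.1 hy with hy | hy
        · exact hn y hy
        · exact hps y (g3 y hy).1
      · have hstep : pvB_pass src header (PySem.Dict.mk preds) (n :: ks) (nodes, c)
            = pvB_pass src header (PySem.Dict.mk preds) ks (nodes, c) := by
          simp only [pvB_pass, List.foldl_cons]
          rw [if_neg hb]
        rw [hstep] at hx
        exact ih nodes c hn x hx

lemma pvB_loop_sound (src header : Int) (preds : List (Int × List Int)) (T : List Int)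
    (hT : pvClosed src header preds T) :
    ∀ (fuel : Nat) (nodes : List Int), (∀ x ∈ nodes, x ∈ T) →
      ∀ y ∈ pvB_loop src header (PySem.Dict.mk preds) (PySem.Dict.mk preds).keys fuel nodes, y ∈ T := by
  intro fuel
  induction fuel with
  | zero => intro nodes hn y hy; simp [pvB_loop] at hy; exact hn y hy
  | succ fuel ih =>
      intro nodes hn y hy
      have hrw : pvB_loop src header (PySem.Dict.mk preds) (PySem.Dict.mk preds).keys (fuel + 1) nodes
          = if (pvB_pass src header (PySem.Dict.mk preds) (PySem.Dict.mk preds).keys (nodes, false)).2 then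
              pvB_loop src header (PySem.Dict.mk preds) (PySem.Dict.mk preds).keys fuel
                (pvB_pass src header (PySem.Dict.mk preds) (PySem.Dict.mk preds).keys (nodes, false)).1
            else (pvB_pass src header (PySem.Dict.mk preds) (PySem.Dict.mk preds).keys (nodes, false)).1 := rfl
      rw [hrw] at hy
      have hsub : ∀ x ∈ (pvB_pass src header (PySem.Dict.mk preds) (PySem.Dict.mk preds).keys (nodes, false)).1, x ∈ T :=
        pvB_pass_sound src header preds T hT _ nodes false hn
      split_ifs at hy with hc
      · exact ih _ hsub y hy
      · exact hsub y hy

lemma pvB_loop_complete (src header : Int) (preds : List (Int × List Int)) :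
    ∀ (fuel : Nat) (nodes : List Int),
      nodes.Nodup → pvMiss preds nodes + 1 ≤ fuel →
      (pvB_loop src header (PySem.Dict.mk preds) (PySem.Dict.mk preds).keys fuel nodes).Nodup ∧
      (∀ x ∈ nodes, x ∈ pvB_loop src header (PySem.Dict.mk preds) (PySem.Dict.mk preds).keys fuel nodes) ∧
      pvClosed src header preds (pvB_loop src header (PySem.Dict.mk preds) (PySem.Dict.mk preds).keys fuel nodes) := by
  intro fuel
  induction fuel with
  | zero => intro nodes _ hfuel; omega
  | succ fuel ih =>
      intro nodes hnd hfuel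
      obtain ⟨e, h1, h2, h3, h4, h5⟩ :=
        pvB_pass_spec src header preds (PySem.Dict.mk preds).keys nodes false
      have hrw : pvB_loop src header (PySem.Dict.mk preds) (PySem.Dict.mk preds).keys (fuel + 1) nodes
          = if (pvB_pass src header (PySem.Dict.mk preds) (PySem.Dict.mk preds).keys (nodes, false)).2 then
              pvB_loop src header (PySem.Dict.mk preds) (PySem.Dict.mk preds).keys fuel
                (pvB_pass src header (PySem.Dict.mk preds) (PySem.Dict.mk preds).keys (nodes, false)).1
            else (pvB_pass src header (PySem.Dict.mk preds) (PySem.Dict.mk preds).keys (nodes, false)).1 := rfl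
      cases he : e with
      | nil =>
          have hflag : (pvB_pass src header (PySem.Dict.mk preds) (PySem.Dict.mk preds).keys (nodes, false)).2 = false := by
            rw [h4, he]; simp
          have hres : pvB_loop src header (PySem.Dict.mk preds) (PySem.Dict.mk preds).keys (fuel + 1) nodes = nodes := by
            rw [hrw, hflag]
            simp only [if_neg (by simp : ¬ (false = true))]
            rw [h1, he, List.append_nil]
          rw [hres]
          refine ⟨hnd, fun x hx => hx, ?_⟩
          intro n hn hexp p hp
          exact h5 he n (pv_getD_key_mem hp) hn hexp p hp
      | cons a e' =>
          have hflag : (pvB_pass src header (PySem.Dict.mk preds) (PySem.Dict.mk preds).keys (nodes, false)).2 = true := by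
            rw [h4, he]; simp
          have hres : pvB_loop src header (PySem.Dict.mk preds) (PySem.Dict.mk preds).keys (fuel + 1) nodes
              = pvB_loop src header (PySem.Dict.mk preds) (PySem.Dict.mk preds).keys fuel (nodes ++ e) := by
            rw [hrw, hflag, if_pos rfl, h1]
          have hnd' : (nodes ++ e).Nodup := by
            rw [List.nodup_append]
            refine ⟨hnd, h2, ?_⟩
            rintro x hx y hy rfl
            exact (h3 x hy).2 hx
          have hdrop := pv_miss_drop h2 h3
          have hlen : 1 ≤ e.length := by rw [he]; simp
          obtain ⟨ha, hb, hc⟩ := ih (nodes ++ e) hnd' (by omega)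
          rw [hres]
          exact ⟨ha, fun x hx => hb x (List.mem_append_left _ hx), hc⟩

-- ===== VERDICT (by name: the statement is the Claim_ definition above) =====
theorem natural_loop_py_spec : Claim_equal_natural_loop_py := by
  intro src header preds _dom
  unfold Spec_natural_loop_py natural_loop_py natural_loop_py_alt
  set n₀ : List Int := PySem.Set.add (PySem.Set.add PySem.Set.empty header) src with hn₀
  have hmem : ∀ x, x ∈ n₀ ↔ x = header ∨ x = src := by
    intro x
    simp [hn₀, PySem.Set.mem_add, PySem.Set.empty]
  have hnd : n₀.Nodup :=
    PySem.Set.nodup_add _ _ (PySem.Set.nodup_add _ _ List.nodup_nil)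
  have hsrc : src ∈ n₀ := (hmem src).2 (Or.inr rfl)
  have hhd : header ∈ n₀ := (hmem header).2 (Or.inl rfl)
  have hinv0 : ∀ n ∈ n₀, n ∉ ([src] : List Int) → (n = src ∨ n ≠ header) →
      ∀ p ∈ PySem.Dict.getD (PySem.Dict.mk preds) n [], p ∈ n₀ := by
    intro n hn hns hexp p _
    exfalso
    rcases (hmem n).1 hn with rfl | rfl
    · rcases hexp with rfl | hne
      · exact hns (by simp)
      · exact hne rfl
    · exact hns (by simp)
  have hexp0 : ∀ x ∈ ([src] : List Int), x = src ∨ x ≠ header := by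
    intro x hx; rw [List.mem_singleton] at hx; subst hx; exact Or.inl rfl
  have hsub0 : ∀ x ∈ ([src] : List Int), x ∈ n₀ := by
    intro x hx; rw [List.mem_singleton] at hx; subst hx; exact hsrc
  have hmissle : pvMiss preds n₀ ≤ preds.foldl (fun a kv => a + kv.2.length) 0 := by
    rw [pv_fuel_eq]; exact pv_miss_le preds n₀
  -- the two traversal results
  obtain ⟨hAnd, hAsup, hAcl⟩ := pvA_loop_complete preds src header
    (preds.foldl (fun a kv => a + kv.2.length) 0 + 1) n₀ [src]
    hnd hsrc hhd hsub0 hinv0 (by simpa using by omega)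
  obtain ⟨hBnd, hBsup, hBcl⟩ := pvB_loop_complete src header preds
    (preds.foldl (fun a kv => a + kv.2.length) 0 + 1) n₀ hnd (by omega)
  set RA := pvA_loop preds header (preds.foldl (fun a kv => a + kv.2.length) 0 + 1) n₀ [src] with hRA
  set RB := pvB_loop src header (PySem.Dict.mk preds) (PySem.Dict.mk preds).keys
    (preds.foldl (fun a kv => a + kv.2.length) 0 + 1) n₀ with hRB
  have hAB : ∀ y ∈ RA, y ∈ RB :=
    pvA_loop_sound preds src header RB hBcl _ n₀ [src]
      (fun x hx => hBsup x hx) (fun x hx => hBsup x (hsub0 x hx)) hexp0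
  have hBA : ∀ y ∈ RB, y ∈ RA :=
    pvB_loop_sound src header preds RA hAcl _ n₀ (fun x hx => hAsup x hx)
  have hperm : RA.Perm RB :=
    (List.perm_ext_iff_of_nodup hAnd hBnd).mpr (fun a => ⟨hAB a, hBA a⟩)
  exact PySem.List.sorted_eq_sorted_of_perm RA RB (fun x => x) (fun a b h => h) hperm
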